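-- pv_equiv track=rewrite | github.com/hexatedjuice/juicepouch | projects/jalenBot/main.py | printQuotes
-- ===== SOURCE A (Python) =====
-- def chunks(lst, n):
--     for i in range(0, len(lst), n):
--         yield lst[i:i + n]
--
-- def printQuotes(arr):
--     arr = chunks(arr, 20)
--     ct = 0
--     msg = []
--     final = []
--
--     for x in arr:
--         for y in x:
--             msg.append( "{} {}".format(ct, y))
--             ct += 1
--         final.append("```" + "\n".join(msg) + "```")
--         msg = []
--
--     return final
-- ===== SOURCE B (Python) =====
-- def printQuotes(arr):
--     final = []
--     msg = []
--     for ct, y in enumerate(arr):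
--         msg.append("{} {}".format(ct, y))
--         if len(msg) == 20:
--             final.append("```" + "\n".join(msg) + "```")
--             msg = []
--     if msg:
--         final.append("```" + "\n".join(msg) + "```")
--     return final
-- ===== Notes on version B (the rewrite author's own statement) =====
-- stated objective: simpler
-- what changed: Replaces the chunks() generator (slice-based chunking) plus nested loops with an external ct counter by a single enumerate pass over the flat list that flushes the buffer whenever it reaches 20 items, with a final flush for the trailing partial chunk.
import Mathlib
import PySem

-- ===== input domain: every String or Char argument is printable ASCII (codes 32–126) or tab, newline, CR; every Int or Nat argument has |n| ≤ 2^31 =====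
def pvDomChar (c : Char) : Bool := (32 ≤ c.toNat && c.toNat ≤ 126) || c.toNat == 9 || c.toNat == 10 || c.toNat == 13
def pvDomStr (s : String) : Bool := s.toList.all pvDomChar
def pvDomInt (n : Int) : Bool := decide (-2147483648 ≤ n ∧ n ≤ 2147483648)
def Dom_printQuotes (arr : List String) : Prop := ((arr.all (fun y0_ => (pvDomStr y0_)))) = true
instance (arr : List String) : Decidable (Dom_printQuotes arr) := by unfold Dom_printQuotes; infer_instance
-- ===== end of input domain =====

-- B replaces slice-based chunking + nested loops + external counter by one enumerate pass
-- that flushes the buffer each time it reaches 20 items (objective: simpler).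

-- ===== PORT A =====
-- chunks(arr, 20) materialised: the generator yields arr[i:i+20] for i in range(0, len(arr), 20)
def printQuotes (arr : List String) : List String :=
  let chunked : List (List String) :=
    (PySem.List.pyRange 0 (arr.length : Int) 20).map
      (fun i => PySem.List.slice arr (some i) (some (i + 20)))
  let s := chunked.foldl
      (fun (s : Int × List String × List String) x =>
        let t := x.foldl (fun (p : Int × List String) y =>
            (p.1 + 1, p.2 ++ [PySem.Int.toStr p.1 ++ " " ++ y])) (s.1, s.2.1)
        (t.1, [], s.2.2 ++ ["```" ++ PySem.Str.join "\n" t.2 ++ "```"]))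
      (0, [], [])
  s.2.2

-- ===== PORT B =====
def printQuotes_alt (arr : List String) : List String :=
  let s := (PySem.List.enumerate arr 0).foldl
      (fun (p : List String × List String) cy =>
        let msg := p.1 ++ [PySem.Int.toStr cy.1 ++ " " ++ cy.2]
        if msg.length == 20 then
          ([], p.2 ++ ["```" ++ PySem.Str.join "\n" msg ++ "```"])
        else (msg, p.2))
      ([], [])
  if s.1.isEmpty then s.2 else s.2 ++ ["```" ++ PySem.Str.join "\n" s.1 ++ "```"]

-- ===== PRECONDITION & SPEC =====
def Spec_printQuotes (arr : List String) (out : List String) : Prop := out = printQuotes_alt arr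
instance (arr : List String) (out : List String) : Decidable (Spec_printQuotes arr out) := by unfold Spec_printQuotes; infer_instance

-- ===== CLAIM (what is proved, stated in full; the proofs are below) =====
def Claim_equal_printQuotes : Prop := ∀ (arr : List String), Dom_printQuotes arr → Spec_printQuotes arr (printQuotes arr)

-- ===== LEMMAS AND PROOFS =====

-- proof helpers
def pvStepA (s : Int × List String × List String) (x : List String) :
    Int × List String × List String :=
  let t := x.foldl (fun (p : Int × List String) y =>
      (p.1 + 1, p.2 ++ [PySem.Int.toStr p.1 ++ " " ++ y])) (s.1, s.2.1)
  (t.1, [], s.2.2 ++ ["```" ++ PySem.Str.join "\n" t.2 ++ "```"])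

def pvStepB (p : List String × List String) (cy : Int × String) :
    List String × List String :=
  let msg := p.1 ++ [PySem.Int.toStr cy.1 ++ " " ++ cy.2]
  if msg.length == 20 then
    ([], p.2 ++ ["```" ++ PySem.Str.join "\n" msg ++ "```"])
  else (msg, p.2)

def pvBlock (msg : List String) : String := "```" ++ PySem.Str.join "\n" msg ++ "```"

def pvFinish (s : List String × List String) : List String :=
  if s.1.isEmpty then s.2 else s.2 ++ [pvBlock s.1]

def pvFmt : List String → Int → List String
  | [], _ => []
  | y :: ys, ct => (PySem.Int.toStr ct ++ " " ++ y) :: pvFmt ys (ct + 1)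

def chunkRec : List String → List (List String)
  | [] => []
  | y :: ys => ((y :: ys).take 20) :: chunkRec ((y :: ys).drop 20)
termination_by l => l.length
decreasing_by simp

def chunkClosed (arr : List String) : List (List String) :=
  (List.range ((arr.length + 19) / 20)).map (fun k => (arr.drop (20 * k)).take 20)

lemma printQuotes_eq_fold (arr : List String) :
    printQuotes arr =
      (((PySem.List.pyRange 0 (arr.length : Int) 20).map
          (fun i => PySem.List.slice arr (some i) (some (i + 20)))).foldl
        pvStepA (0, [], [])).2.2 := rfl

lemma printQuotes_alt_eq_fold (arr : List String) :
    printQuotes_alt arr =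
      pvFinish ((PySem.List.enumerate arr 0).foldl pvStepB ([], [])) := rfl

lemma pvFmt_ne_nil (c : List String) (h : c ≠ []) (ct : Int) : pvFmt c ct ≠ [] := by
  cases c with
  | nil => exact absurd rfl h
  | cons y ys => simp [pvFmt]

lemma pvSlice20 (arr : List String) (k : Nat) :
    PySem.List.slice arr (some (20 * (k : Int))) (some (20 * (k : Int) + 20)) =
      (arr.drop (20 * k)).take 20 := by
  have h := PySem.List.slice_natCast_add arr (20 * k) 20
  push_cast at h
  simpa using h

lemma chunksA_eq_closed (arr : List String) :
    (PySem.List.pyRange 0 (arr.length : Int) 20).map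
      (fun i => PySem.List.slice arr (some i) (some (i + 20))) = chunkClosed arr := by
  rw [PySem.List.pyRange_of_pos 0 (arr.length : Int) (by norm_num)]
  have hm : (if (0 : Int) < (arr.length : Int) then
      (((arr.length : Int) - 0 + 20 - 1) / 20).toNat else 0) = (arr.length + 19) / 20 := by
    rcases Nat.eq_zero_or_pos arr.length with h | h
    · simp [h]
    · have h0 : (0 : Int) < (arr.length : Int) := by exact_mod_cast h
      rw [if_pos h0]
      omega
  rw [hm, chunkClosed, List.map_map]
  refine List.map_congr_left ?_
  intro k _
  simp [pvSlice20]

lemma chunkClosed_eq_chunkRec (arr : List String) : chunkClosed arr = chunkRec arr := by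
  cases harr : arr with
  | nil => simp [chunkClosed, chunkRec]
  | cons y ys =>
    have hcount : ((y :: ys).length + 19) / 20 = ((((y :: ys).drop 20).length + 19) / 20) + 1 := by
      rw [List.length_drop]; simp only [List.length_cons]; omega
    have hstep : chunkClosed (y :: ys) = (y :: ys).take 20 :: chunkClosed ((y :: ys).drop 20) := by
      rw [chunkClosed, hcount, List.range_succ_eq_map, List.map_cons, List.map_map]
      simp only [Nat.mul_zero, List.drop_zero]
      congr 1
      rw [chunkClosed, List.length_drop]
      refine List.map_congr_left ?_
      intro k _
      simp [List.drop_drop, Nat.mul_succ]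
      rw [Nat.add_comm]
    rw [hstep, chunkClosed_eq_chunkRec ((y :: ys).drop 20), chunkRec]
termination_by arr.length
decreasing_by
  subst harr; simp

lemma foldA_inner (c : List String) : ∀ (ct : Int) (msg : List String),
    c.foldl (fun (p : Int × List String) y =>
        (p.1 + 1, p.2 ++ [PySem.Int.toStr p.1 ++ " " ++ y])) (ct, msg) =
      (ct + c.length, msg ++ pvFmt c ct) := by
  induction c with
  | nil => intro ct msg; simp [pvFmt]
  | cons y ys ih =>
    intro ct msg
    simp only [List.foldl_cons, ih, pvFmt, List.length_cons]
    rw [Prod.mk.injEq]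
    refine ⟨by push_cast; ring, by simp⟩

lemma foldB_run (c : List String) : ∀ (ct : Int) (msg final : List String),
    msg.length + c.length ≤ 20 →
    (PySem.List.enumerate c ct).foldl pvStepB (msg, final) =
      (if msg.length + c.length = 20 ∧ c ≠ [] then
        ([], final ++ [pvBlock (msg ++ pvFmt c ct)])
      else (msg ++ pvFmt c ct, final)) := by
  induction c with
  | nil => intro ct msg final h; simp [pvFmt, PySem.List.enumerate_nil]
  | cons y ys ih =>
    intro ct msg final h
    rw [PySem.List.enumerate_cons, List.foldl_cons]
    simp only [pvStepB]
    by_cases h20 : msg.length + 1 = 20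
    · have hys : ys = [] := by
        have hy : ys.length = 0 := by simp at h; omega
        exact List.eq_nil_of_length_eq_zero hy
      subst hys
      rw [if_pos (by simp; omega)]
      rw [PySem.List.enumerate_nil, List.foldl_nil]
      rw [if_pos ⟨by simp; omega, by simp⟩]
      simp [pvFmt, pvBlock]
    · rw [if_neg (by simp; omega)]
      rw [ih (ct + 1) (msg ++ [PySem.Int.toStr ct ++ " " ++ y]) final (by simp at h ⊢; omega)]
      simp only [List.length_append, List.length_cons, pvFmt]
      have hiff : (msg ++ [PySem.Int.toStr ct ++ " " ++ y]).length + ys.length = 20 ∧ ys ≠ [] ↔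
          msg.length + (y :: ys).length = 20 ∧ y :: ys ≠ [] := by
        constructor
        · rintro ⟨h1, _⟩
          refine ⟨by simp at h1 ⊢; omega, by simp⟩
        · rintro ⟨h1, _⟩
          refine ⟨by simp at h1 ⊢; omega, ?_⟩
          intro hys; subst hys; simp at h1; omega
      split_ifs with hc1 hc2 hc2
      · simp
      · exact absurd (hiff.mp (by simpa using hc1)) (by simpa using hc2)
      · exact absurd (hiff.mpr (by simpa using hc2)) (by simpa using hc1)
      · simp

lemma main_loop (arr : List String) : ∀ (ct : Int) (final : List String),
    ((chunkRec arr).foldl pvStepA (ct, [], final)).2.2 =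
      pvFinish ((PySem.List.enumerate arr ct).foldl pvStepB ([], final)) := by
  intro ct final
  cases harr : arr with
  | nil => simp [chunkRec, PySem.List.enumerate_nil, pvFinish]
  | cons y ys =>
    rw [← harr]
    have hne : arr ≠ [] := by rw [harr]; simp
    have hchunk : chunkRec arr = arr.take 20 :: chunkRec (arr.drop 20) := by
      rw [harr, chunkRec]
    have hstepA : pvStepA (ct, [], final) (arr.take 20) =
        (ct + ((arr.take 20).length : Int), [], final ++ [pvBlock (pvFmt (arr.take 20) ct)]) := by
      simp [pvStepA, foldA_inner, pvBlock]
    by_cases hlen : arr.length ≤ 20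
    · have htake : arr.take 20 = arr := List.take_of_length_le hlen
      have hdrop : arr.drop 20 = [] := List.drop_eq_nil_of_le hlen
      rw [hchunk, hdrop, List.foldl_cons, hstepA, htake]
      rw [show chunkRec [] = [] by rw [chunkRec], List.foldl_nil]
      rw [foldB_run arr ct [] final (by simp; omega)]
      by_cases h20 : arr.length = 20
      · rw [if_pos ⟨by simp [h20], hne⟩]
        simp [pvFinish]
      · rw [if_neg (by rintro ⟨h1, _⟩; simp at h1; exact h20 h1)]
        have hni : (pvFmt arr ct).isEmpty = false := by
          simp only [List.isEmpty_eq_false_iff]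
          exact pvFmt_ne_nil arr hne ct
        simp [pvFinish, hni]
    · push_neg at hlen
      have htlen : (arr.take 20).length = 20 := by simp; omega
      have htc : (((arr.take 20).length : Nat) : Int) = 20 := by rw [htlen]; norm_num
      have hsplit : arr = arr.take 20 ++ arr.drop 20 := (List.take_append_drop 20 arr).symm
      rw [hchunk, List.foldl_cons, hstepA, htc]
      conv_rhs => rw [hsplit]
      rw [PySem.List.enumerate_append, List.foldl_append]
      rw [foldB_run (arr.take 20) ct [] final (by simp [htlen])]
      have hcond : ([] : List String).length + (arr.take 20).length = 20 ∧ arr.take 20 ≠ [] :=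
        ⟨by simp [htlen], by intro h; rw [h] at htlen; simp at htlen⟩
      rw [if_pos hcond]
      simp only [List.nil_append, htc]
      exact main_loop (arr.drop 20) (ct + 20) (final ++ [pvBlock (pvFmt (arr.take 20) ct)])
termination_by arr.length
decreasing_by
  rw [harr]; simp

-- ===== VERDICT (by name: the statement is the Claim_ definition above) =====
theorem printQuotes_spec : Claim_equal_printQuotes := by
  intro arr _
  unfold Spec_printQuotes
  rw [printQuotes_eq_fold, printQuotes_alt_eq_fold, chunksA_eq_closed, chunkClosed_eq_chunkRec]
  exact main_loop arr 0 []
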